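-- pv_equiv track=rewrite | github.com/Kie-Chi/Pympp | pympp/mips/assembler.py | _build_machine_code
-- ===== SOURCE A (Python) =====
-- from typing import Dict, List, Tuple, Optional, Type
--
-- def _build_machine_code(encoding: str, operands: Dict[str, int]) -> int:
--     """Build machine code from encoding pattern and operands"""
--     # encoding format: "000000 sssss ttttt ddddd hhhhh 100000"
--     # d/s/t/i/h represent different operand fields
--     encoding = encoding.replace(' ', '')
--     field_widths = {}
--     for char in 'dstih':
--         if char in encoding:
--             field_widths[char] = encoding.count(char)
--
--     machine_code = 0
--     bit_pos = 31
--     processed = {char: 0 for char in 'dstih'}  # Track how many bits processed for each field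
--
--     for char in encoding:
--         if char in '01':
--             # Fixed bit
--             if char == '1':
--                 machine_code |= (1 << bit_pos)
--             bit_pos -= 1
--         elif char in operands:
--             operand_val = operands[char]
--             field_width = field_widths[char]
--             bit_index = processed[char]
--             processed[char] += 1
--             bit_value = (operand_val >> (field_width - bit_index - 1)) & 1
--             if bit_value:
--                 machine_code |= (1 << bit_pos)
--
--             bit_pos -= 1
--         else:
--             # Unknown character, treat as 0
--             bit_pos -= 1
--
--     return machine_code
-- ===== SOURCE B (Python) =====
-- def _build_machine_code(encoding: str, operands) -> int:
--     """Build machine code from encoding pattern and operands"""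
--     s = encoding.replace(' ', '')
--     machine_code = 0
--     # fixed '1' bits
--     for i, c in enumerate(s):
--         if c == '1':
--             machine_code |= 1 << (31 - i)
--     # one pass per operand field: collect its bit positions, then emit its bits
--     for f in 'dstih':
--         if f in operands:
--             positions = [i for i, c in enumerate(s) if c == f]
--             width = len(positions)
--             value = operands[f]
--             for j, i in enumerate(positions):
--                 if (value >> (width - 1 - j)) & 1:
--                     machine_code |= 1 << (31 - i)
--     return machine_code
-- ===== Notes on version B (the rewrite author's own statement) =====
-- stated objective: alternative
-- what changed: Instead of one stateful left-to-right scan tracking bit_pos and a per-field processed counter dict, B first sets all fixed '1' bits by position, then handles each operand field independently: it collects the field's bit positions in one comprehension and ORs in that operand's bits from most- to least-significant.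
-- outside the precondition, e.g. on _build_machine_code('000000000000000000000000000000000', {}): A returns 0, B returns 0
import Mathlib
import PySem

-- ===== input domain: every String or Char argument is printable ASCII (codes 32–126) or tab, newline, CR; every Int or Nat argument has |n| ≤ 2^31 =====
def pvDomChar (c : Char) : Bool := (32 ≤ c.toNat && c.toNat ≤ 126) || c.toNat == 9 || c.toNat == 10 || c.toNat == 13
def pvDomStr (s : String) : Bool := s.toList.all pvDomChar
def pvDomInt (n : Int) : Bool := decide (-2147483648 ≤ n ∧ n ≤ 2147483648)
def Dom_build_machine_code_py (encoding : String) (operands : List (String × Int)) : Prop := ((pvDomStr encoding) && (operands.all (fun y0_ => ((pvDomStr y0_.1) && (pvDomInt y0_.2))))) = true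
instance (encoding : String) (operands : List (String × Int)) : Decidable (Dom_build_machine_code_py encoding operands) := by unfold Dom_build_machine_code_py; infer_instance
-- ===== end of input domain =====

-- B replaces A's single stateful scan (bit_pos counter + per-field `processed` dict) by independent
-- passes: set the fixed '1' bits by position, then emit each operand field from its own position list
-- (objective: alternative decomposition, same cost).

-- ===== PORT A =====
-- shared by both ports: Python `encoding.replace(' ', '')`
def pvStrip (encoding : String) : List Char := PySem.Chars.replace encoding.toList [' '] []

-- body of A's main `for char in encoding` loop; state = (machine_code, bit_pos, processed).
-- `1 << bit_pos` and `operand_val >> k` are ported with `.toNat` shift counts: exact whenever the count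
-- is nonnegative (Pre_ guarantees this; Python raises ValueError on a negative count).
-- `field_widths[char]` / `processed[char]` are ported as `getD _ 0`: under Pre_ the key is present.
def pvAStep (operands : List (String × Int)) (field_widths : PySem.Dict Char Int)
    (st : Int × Int × PySem.Dict Char Int) (c : Char) : Int × Int × PySem.Dict Char Int :=
  if c == '0' || c == '1' then
    ((if c == '1' then PySem.Int.bor st.1 (1 <<< st.2.1.toNat) else st.1), st.2.1 - 1, st.2.2)
  else
    match operands.lookup (String.ofList [c]) with
    | some operand_val =>
        let field_width := field_widths.getD c 0
        let bit_index := st.2.2.getD c 0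
        let bit_value := PySem.Int.band (operand_val >>> (field_width - bit_index - 1).toNat) 1
        ((if bit_value ≠ 0 then PySem.Int.bor st.1 (1 <<< st.2.1.toNat) else st.1),
         st.2.1 - 1, st.2.2.insert c (bit_index + 1))
    | none => (st.1, st.2.1 - 1, st.2.2)

def build_machine_code_py (encoding : String) (operands : List (String × Int)) : Int :=
  let s := pvStrip encoding
  -- `char in encoding` / `encoding.count(char)` for a single-character needle: ported as list
  -- membership / element count (exact for single characters)
  let field_widths : PySem.Dict Char Int := "dstih".toList.foldl
    (fun d c => if s.contains c then d.insert c ((s.count c : Int)) else d) PySem.Dict.empty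
  let processed : PySem.Dict Char Int :=
    "dstih".toList.foldl (fun d c => d.insert c 0) PySem.Dict.empty
  (s.foldl (pvAStep operands field_widths) (0, 31, processed)).1

-- ===== PORT B =====
-- one iteration of B's `for f in 'dstih'` loop
def pvBField (s : List Char) (operands : List (String × Int)) (machine_code : Int) (f : Char) : Int :=
  match operands.lookup (String.ofList [f]) with
  | none => machine_code
  | some value =>
      let positions := (PySem.List.enumerate s).filterMap (fun p => if p.2 == f then some p.1 else none)
      let width : Int := positions.length
      (PySem.List.enumerate positions).foldl
        (fun machine_code q =>
          if PySem.Int.band (value >>> (width - 1 - q.1).toNat) 1 ≠ 0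
          then PySem.Int.bor machine_code (1 <<< (31 - q.2).toNat) else machine_code) machine_code

def build_machine_code_py_alt (encoding : String) (operands : List (String × Int)) : Int :=
  let s := pvStrip encoding
  let machine_code := (PySem.List.enumerate s).foldl
    (fun machine_code p =>
      if p.2 == '1' then PySem.Int.bor machine_code (1 <<< (31 - p.1).toNat) else machine_code) 0
  "dstih".toList.foldl (pvBField s operands) machine_code

-- ===== PRECONDITION & SPEC =====
-- Pre_ excludes (a) encodings whose space-stripped form exceeds 32 characters: there Python A raises
-- ValueError (1 << negative bit position) whenever any '1' or any set operand bit falls past bit 0,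
-- returning only in the accidental all-clear corner (e.g. 33 '0's — see the claim's cites); and
-- (b) encodings containing a character outside '01dstih' that is also an operand key: there A raises
-- KeyError (field_widths has no such key).
def Pre_build_machine_code_py (encoding : String) (operands : List (String × Int)) : Prop :=
  (pvStrip encoding).length ≤ 32 ∧
  ((pvStrip encoding).all
    (fun c => c ∈ "01dstih".toList || (operands.lookup (String.ofList [c])).isNone)) = true

instance (encoding : String) (operands : List (String × Int)) :
    Decidable (Pre_build_machine_code_py encoding operands) := by
  unfold Pre_build_machine_code_py; infer_instance

def pvWitness_build_machine_code_py : String × (List (String × Int)) :=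
  ("101dd", [("d", 3)])

def Spec_build_machine_code_py (encoding : String) (operands : List (String × Int)) (out : Int) : Prop :=
  out = build_machine_code_py_alt encoding operands
instance (encoding : String) (operands : List (String × Int)) (out : Int) :
    Decidable (Spec_build_machine_code_py encoding operands out) := by
  unfold Spec_build_machine_code_py; infer_instance

-- ===== CLAIM (what is proved, stated in full; the proofs are below) =====
def Claim_equal_build_machine_code_py : Prop :=
  ∀ (encoding : String) (operands : List (String × Int)),
    Dom_build_machine_code_py encoding operands →
    Pre_build_machine_code_py encoding operands →
    Spec_build_machine_code_py encoding operands (build_machine_code_py encoding operands)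

-- ===== LEMMAS AND PROOFS =====

-- the power-of-two bit term both ports OR in at character index i
def pvTwo (i : Int) : Int := 1 <<< (31 - i).toNat

-- the bit contribution of the enumerated character p = (index, char) of the stripped encoding
def pvTm (s : List Char) (operands : List (String × Int)) (p : Int × Char) : Int :=
  if p.2 = '1' then pvTwo p.1
  else if p.2 ∈ "dstih".toList then
    match operands.lookup (String.ofList [p.2]) with
    | none => 0
    | some v =>
        if PySem.Int.band (v >>> ((s.count p.2 : Int) - ((s.take p.1.toNat).count p.2 : Int) - 1).toNat) 1 ≠ 0
        then pvTwo p.1 else 0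
  else 0

lemma pvTwo_nonneg (i : Int) : 0 ≤ pvTwo i := by
  simp [pvTwo, Int.shiftLeft_eq]

lemma pvTm_nonneg (s : List Char) (operands : List (String × Int)) (p : Int × Char) :
    0 ≤ pvTm s operands p := by
  unfold pvTm
  split_ifs <;> try positivity
  all_goals (first
    | exact pvTwo_nonneg _
    | (cases hlk : operands.lookup (String.ofList [p.2]) <;> simp [hlk] <;> split_ifs <;>
        simp [pvTwo_nonneg]))

lemma pv_bor_nonneg (a b : Int) (ha : 0 ≤ a) (hb : 0 ≤ b) : 0 ≤ PySem.Int.bor a b := by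
  rw [PySem.Int.bor_of_nonneg ha hb]; positivity

lemma pv_bor_rightcomm (a x y : Int) (ha : 0 ≤ a) (hx : 0 ≤ x) (hy : 0 ≤ y) :
    PySem.Int.bor (PySem.Int.bor a x) y = PySem.Int.bor (PySem.Int.bor a y) x := by
  rw [PySem.Int.bor_of_nonneg ha hx, PySem.Int.bor_of_nonneg ha hy,
      PySem.Int.bor_of_nonneg (by positivity) hy, PySem.Int.bor_of_nonneg (by positivity) hx]
  norm_num [Nat.lor_assoc]
  rw [Nat.lor_comm x.toNat y.toNat]

lemma pv_foldl_bor_perm {l₁ l₂ : List Int} (h : l₁.Perm l₂) (hl : ∀ x ∈ l₁, 0 ≤ x) :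
    ∀ a : Int, 0 ≤ a → l₁.foldl PySem.Int.bor a = l₂.foldl PySem.Int.bor a := by
  induction h with
  | nil => intro a _; rfl
  | cons x p ih =>
      intro a ha
      simp only [List.foldl_cons]
      exact ih (fun y hy => hl y (List.mem_cons_of_mem _ hy)) _
        (pv_bor_nonneg a x ha (hl x List.mem_cons_self))
  | swap x y t =>
      intro a ha
      simp only [List.foldl_cons]
      rw [pv_bor_rightcomm a y x ha (hl y List.mem_cons_self)
        (hl x (List.mem_cons_of_mem _ List.mem_cons_self))]
  | trans p₁ p₂ ih₁ ih₂ =>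
      intro a ha
      rw [ih₁ hl a ha, ih₂ (fun y hy => hl y (p₁.mem_iff.mpr hy)) a ha]

lemma pv_foldl_bor_zeros (l : List Int) (h : ∀ x ∈ l, x = 0) (a : Int) :
    l.foldl PySem.Int.bor a = a := by
  induction l with
  | nil => rfl
  | cons x t ih =>
      have hx := h x List.mem_cons_self
      simp only [List.foldl_cons, hx, PySem.Int.bor_zero]
      exact ih (fun y hy => h y (List.mem_cons_of_mem _ hy))

-- loop-shape: B's ones loop as a fold of bit terms
lemma pv_ones_shape (l : List (Int × Char)) : ∀ a : Int,
    l.foldl (fun machine_code p =>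
      if p.2 == '1' then PySem.Int.bor machine_code (1 <<< (31 - p.1).toNat) else machine_code) a
    = (l.map (fun p => if p.2 == '1' then pvTwo p.1 else 0)).foldl PySem.Int.bor a := by
  induction l with
  | nil => intro a; rfl
  | cons p t ih =>
      intro a
      simp only [List.foldl_cons, List.map_cons]
      rw [ih]
      by_cases hp : p.2 == '1'
      · rw [if_pos hp, if_pos hp]; rfl
      · rw [if_neg hp, if_neg hp, PySem.Int.bor_zero]

-- loop-shape: B's per-field loop as a fold of bit terms
lemma pv_field_shape (v w : Int) (l : List (Int × Int)) : ∀ a : Int,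
    l.foldl (fun machine_code q =>
      if PySem.Int.band (v >>> (w - 1 - q.1).toNat) 1 ≠ 0
      then PySem.Int.bor machine_code (1 <<< (31 - q.2).toNat) else machine_code) a
    = (l.map (fun q => if PySem.Int.band (v >>> (w - 1 - q.1).toNat) 1 ≠ 0 then pvTwo q.2 else 0)).foldl
        PySem.Int.bor a := by
  induction l with
  | nil => intro a; rfl
  | cons q t ih =>
      intro a
      simp only [List.foldl_cons, List.map_cons]
      rw [ih]
      by_cases hq : PySem.Int.band (v >>> (w - 1 - q.1).toNat) 1 ≠ 0
      · rw [if_pos hq, if_pos hq]; rfl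
      · rw [if_neg hq, if_neg hq, PySem.Int.bor_zero]

-- partitioning a list by the (distinct) classes of its second component
lemma pv_perm_partition (cs : List Char) : ∀ (l : List (Int × Char)), cs.Nodup →
    l.Perm ((cs.flatMap (fun c => l.filter (fun p => p.2 == c))) ++
            l.filter (fun p => !(cs.contains p.2))) := by
  induction cs with
  | nil => intro l _; simp
  | cons c cs ih =>
      intro l hnd
      have hnotmem : c ∉ cs := (List.nodup_cons.mp hnd).1
      have hnd' : cs.Nodup := (List.nodup_cons.mp hnd).2
      have h1 : l.Perm (l.filter (fun p => p.2 == c) ++ l.filter (fun p => !(p.2 == c))) :=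
        (List.filter_append_perm _ l).symm
      have h2 := ih (l.filter (fun p => !(p.2 == c))) hnd'
      have e1 : ∀ c' ∈ cs, (l.filter (fun p => !(p.2 == c))).filter (fun p => p.2 == c')
          = l.filter (fun p => p.2 == c') := by
        intro c' hc'
        rw [List.filter_filter]
        apply List.filter_congr
        intro p _
        by_cases hp : p.2 = c'
        · have : c' ≠ c := fun h => hnotmem (h ▸ hc')
          simp [hp, this]
        · simp [hp]
      have e2 : (l.filter (fun p => !(p.2 == c))).filter (fun p => !(cs.contains p.2))
          = l.filter (fun p => !((c :: cs).contains p.2)) := by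
        rw [List.filter_filter]
        apply List.filter_congr
        intro p _
        by_cases hp : p.2 = c <;> by_cases hm : p.2 ∈ cs <;>
          simp [hp, hm] <;> simp [hp ▸ hm]
      have e3 : cs.flatMap (fun c' => (l.filter (fun p => !(p.2 == c))).filter (fun p => p.2 == c'))
          = cs.flatMap (fun c' => l.filter (fun p => p.2 == c')) := by
        apply List.flatMap_congr
        intro c' hc'
        exact e1 c' hc'
      rw [e3, e2] at h2
      refine h1.trans ?_
      refine (List.Perm.append_left _ h2).trans ?_
      rw [List.flatMap_cons, List.append_assoc]

lemma pv_positions_eq (f : Char) (l : List (Int × Char)) :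
    l.filterMap (fun p => if p.2 == f then some p.1 else none)
      = (l.filter (fun p => p.2 == f)).map Prod.fst := by
  induction l with
  | nil => rfl
  | cons p t ih =>
      simp only [beq_iff_eq] at ih ⊢
      by_cases hp : p.2 = f <;> simp [List.filterMap_cons, hp, ih]

lemma pv_len_filter (f : Char) : ∀ (s : List Char) (k : Int),
    ((PySem.List.enumerate s k).filter (fun p => p.2 == f)).length = s.count f := by
  intro s
  induction s with
  | nil => intro k; rfl
  | cons c t ih =>
      intro k
      rw [PySem.List.enumerate_cons]
      by_cases hc : c = f
      · subst hc
        rw [List.filter_cons_of_pos (by simp)]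
        simp [ih]
      · rw [List.filter_cons_of_neg (by simpa using hc)]
        simp [ih, hc]

lemma pv_filter_elem (f : Char) : ∀ (s : List Char) (k j : Nat)
    (hj : j < ((PySem.List.enumerate s (k : Int)).filter (fun p => p.2 == f)).length),
    ∃ m : Nat, ((PySem.List.enumerate s (k : Int)).filter (fun p => p.2 == f))[j]? = some (((k + m : Nat) : Int), f)
      ∧ m < s.length ∧ (s.take m).count f = j := by
  intro s
  induction s with
  | nil => intro k j hj; simp [PySem.List.enumerate_nil] at hj
  | cons c t ih =>
      intro k j hj
      rw [PySem.List.enumerate_cons] at hj ⊢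
      by_cases hc : c = f
      · subst hc
        rw [List.filter_cons_of_pos (by simp)] at hj ⊢
        match j with
        | 0 => exact ⟨0, by simp, by simp, by simp⟩
        | j+1 =>
            have hk : ((k : Int) + 1) = ((k + 1 : Nat) : Int) := by push_cast; ring
            rw [List.getElem?_cons_succ]
            rw [List.length_cons, Nat.add_lt_add_iff_right] at hj
            rw [hk] at hj ⊢
            obtain ⟨m, hm1, hm2, hm3⟩ := ih (k + 1) j hj
            refine ⟨m + 1, ?_, by simp only [List.length_cons]; omega, ?_⟩
            · rw [hm1]; congr 3; push_cast; ring
            · simp [List.count_cons, hm3]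
      · rw [List.filter_cons_of_neg (by simpa using hc)] at hj ⊢
        have hk : ((k : Int) + 1) = ((k + 1 : Nat) : Int) := by push_cast; ring
        rw [hk] at hj ⊢
        obtain ⟨m, hm1, hm2, hm3⟩ := ih (k + 1) j hj
        refine ⟨m + 1, ?_, by simp only [List.length_cons]; omega, ?_⟩
        · rw [hm1]; congr 3; push_cast; ring
        · simp [List.count_cons, hm3, hc]

-- A's main loop computes the fold of the bit terms of the remaining characters
lemma pvA_loop (operands : List (String × Int)) (s : List Char) (fw : PySem.Dict Char Int)
    (hgood : ∀ c ∈ s, c ∈ "01dstih".toList ∨ (operands.lookup (String.ofList [c])).isNone = true)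
    (hfw : ∀ c ∈ s, c ∈ "dstih".toList → fw.getD c 0 = (s.count c : Int)) :
    ∀ (r : List Char) (k : Nat), r = s.drop k →
    ∀ (mc : Int) (pr : PySem.Dict Char Int),
      (∀ c ∈ "dstih".toList, (operands.lookup (String.ofList [c])).isSome = true →
        pr.getD c 0 = ((s.take k).count c : Int)) →
      (r.foldl (pvAStep operands fw) (mc, 31 - (k : Int), pr)).1
        = ((PySem.List.enumerate r (k : Int)).map (pvTm s operands)).foldl PySem.Int.bor mc := by
  intro r
  induction r with
  | nil => intro k _ mc pr _; simp [PySem.List.enumerate_nil]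
  | cons c r' ih =>
      intro k hdrop mc pr hinv
      have hk : k < s.length := by
        by_contra hge
        rw [List.drop_eq_nil_of_le (by omega)] at hdrop
        simp at hdrop
      have hsk : s[k]? = some c := by
        have h0 : (s.drop k)[0]? = some c := by rw [← hdrop]; rfl
        rwa [List.getElem?_drop, Nat.add_zero] at h0
      have hcs : c ∈ s := List.mem_of_getElem? hsk
      have hr' : r' = s.drop (k + 1) := by
        have h := congrArg List.tail hdrop
        rwa [List.tail_cons, List.tail_drop] at h
      have htake : s.take (k + 1) = s.take k ++ [c] := by
        rw [List.take_succ, hsk]; rfl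
      have hcount_ne : ∀ c' : Char, c' ≠ c → (s.take (k + 1)).count c' = (s.take k).count c' := by
        intro c' hne
        rw [htake, List.count_append]
        simp [Ne.symm hne]
      have hcount_eq : (s.take (k + 1)).count c = (s.take k).count c + 1 := by
        rw [htake, List.count_append]
        simp
      have hcast : (31 : Int) - (k : Int) - 1 = 31 - ((k + 1 : Nat) : Int) := by omega
      have henum : PySem.List.enumerate (c :: r') (k : Int)
          = ((k : Int), c) :: PySem.List.enumerate r' ((k + 1 : Nat) : Int) := by
        have hc : ((k : Int) + 1) = ((k + 1 : Nat) : Int) := by omega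
        rw [PySem.List.enumerate_cons, hc]
      rw [henum, List.map_cons, List.foldl_cons, List.foldl_cons]
      by_cases hc1 : c = '1'
      · subst hc1
        have hstep : pvAStep operands fw (mc, 31 - (k : Int), pr) '1'
            = (PySem.Int.bor mc (1 <<< ((31 : Int) - (k : Int)).toNat), 31 - (k : Int) - 1, pr) := by
          simp [pvAStep]
        rw [hstep, hcast]
        rw [ih (k + 1) hr' _ pr ?_]
        · rfl
        · intro c' hc' hlk'
          rw [hcount_ne c' (by rcases (by simpa using hc' : c' = 'd' ∨ c' = 's' ∨ c' = 't' ∨ c' = 'i' ∨ c' = 'h') with rfl|rfl|rfl|rfl|rfl <;> decide)]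
          exact hinv c' hc' hlk'
      · by_cases hc0 : c = '0'
        · subst hc0
          have hstep : pvAStep operands fw (mc, 31 - (k : Int), pr) '0'
              = (mc, 31 - (k : Int) - 1, pr) := by
            simp [pvAStep]
          rw [hstep, hcast]
          have htm : pvTm s operands ((k : Int), '0') = 0 := by
            unfold pvTm; simp
          rw [htm, ih (k + 1) hr' _ pr ?_, PySem.Int.bor_zero]
          intro c' hc' hlk'
          rw [hcount_ne c' (by rcases (by simpa using hc' : c' = 'd' ∨ c' = 's' ∨ c' = 't' ∨ c' = 'i' ∨ c' = 'h') with rfl|rfl|rfl|rfl|rfl <;> decide)]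
          exact hinv c' hc' hlk'
        · have hb : (c == '0' || c == '1') = false := by simp [hc0, hc1]
          cases hlk : operands.lookup (String.ofList [c]) with
          | none =>
              have hstep : pvAStep operands fw (mc, 31 - (k : Int), pr) c
                  = (mc, 31 - (k : Int) - 1, pr) := by
                unfold pvAStep
                rw [hb]
                simp [hlk]
              have htm : pvTm s operands ((k : Int), c) = 0 := by
                unfold pvTm
                by_cases hd : c ∈ "dstih".toList
                · rw [if_neg hc1, if_pos hd, hlk]
                · rw [if_neg hc1, if_neg hd]
              rw [hstep, hcast, htm, ih (k + 1) hr' _ pr ?_, PySem.Int.bor_zero]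
              intro c' hc' hlk'
              have hne : c' ≠ c := by
                intro h
                rw [h, hlk] at hlk'
                simp at hlk'
              rw [hcount_ne c' hne]
              exact hinv c' hc' hlk'
          | some v =>
              have hcd : c ∈ "dstih".toList := by
                rcases hgood c hcs with hg | hg
                · simp at hg
                  rcases hg with h|h|h|h|h|h|h <;> simp [h] <;> simp [h] at hc0 hc1
                · rw [hlk] at hg; simp at hg
              have hbi : pr.getD c 0 = ((s.take k).count c : Int) :=
                hinv c hcd (by rw [hlk]; rfl)
              have hfwc : fw.getD c 0 = (s.count c : Int) := hfw c hcs hcd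
              have hstep : pvAStep operands fw (mc, 31 - (k : Int), pr) c
                  = ((if PySem.Int.band (v >>> ((s.count c : Int) - ((s.take k).count c : Int) - 1).toNat) 1 ≠ 0
                      then PySem.Int.bor mc (1 <<< ((31 : Int) - (k : Int)).toNat) else mc),
                     31 - (k : Int) - 1, pr.insert c (pr.getD c 0 + 1)) := by
                unfold pvAStep
                rw [hb]
                simp only [Bool.false_eq_true, if_false, hlk, hbi, hfwc]
              have htm : pvTm s operands ((k : Int), c)
                  = (if PySem.Int.band (v >>> ((s.count c : Int) - ((s.take k).count c : Int) - 1).toNat) 1 ≠ 0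
                     then pvTwo (k : Int) else 0) := by
                unfold pvTm
                simp only [hc1, if_false, hcd, if_true, hlk]
                rw [Int.toNat_natCast]
              rw [hstep, hcast, htm, ih (k + 1) hr' _ _ ?_]
              · by_cases hbit : PySem.Int.band (v >>> ((s.count c : Int) - ((s.take k).count c : Int) - 1).toNat) 1 ≠ 0
                · rw [if_pos hbit, if_pos hbit]; rfl
                · rw [if_neg hbit, if_neg hbit, PySem.Int.bor_zero]
              · intro c' hc' hlk'
                by_cases hne : c' = c
                · subst hne
                  rw [PySem.Dict.getD_insert_self, hbi, hcount_eq]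
                  push_cast
                  ring
                · rw [PySem.Dict.getD_insert, if_neg hne, hcount_ne c' hne]
                  exact hinv c' hc' hlk'

-- B's per-field pass equals the fold of the bit terms of that field's characters
lemma pvBField_eq (s : List Char) (operands : List (String × Int)) (f : Char)
    (hf : f ∈ "dstih".toList) (mc : Int) :
    pvBField s operands mc f
      = (((PySem.List.enumerate s).filter (fun p => p.2 == f)).map (pvTm s operands)).foldl
          PySem.Int.bor mc := by
  unfold pvBField
  cases hlk : operands.lookup (String.ofList [f]) with
  | none =>
      rw [pv_foldl_bor_zeros]
      intro x hx
      obtain ⟨p, hp, rfl⟩ := List.mem_map.mp hx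
      have hpf : p.2 = f := by
        have := List.of_mem_filter hp
        simpa using this
      have hf' : f ≠ '1' := by
        intro h; rw [h] at hf; simp at hf
      unfold pvTm
      rw [hpf, if_neg hf', if_pos hf, hlk]
  | some v =>
      simp only
      rw [pv_field_shape]
      congr 1
      rw [pv_positions_eq]
      have hw : (((PySem.List.enumerate s).filter (fun p => p.2 == f)).map Prod.fst).length
          = s.count f := by
        rw [List.length_map, pv_len_filter]
      apply List.ext_getElem
      · simp [PySem.List.length_enumerate]
      · intro j hj hj2
        have hjlen : j < ((PySem.List.enumerate s).filter (fun p => p.2 == f)).length := by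
          simpa using hj2
        have hjlen' : j < (((PySem.List.enumerate s).filter (fun p => p.2 == f)).map Prod.fst).length := by
          simpa using hjlen
        obtain ⟨m, hm1, hm2, hm3⟩ := pv_filter_elem f s 0 j (by simpa using hjlen)
        simp only [Nat.cast_zero, Nat.zero_add] at hm1
        have hm1' : ((PySem.List.enumerate s).filter (fun p => p.2 == f))[j]'hjlen = (((m : Nat) : Int), f) := by
          have h2 := List.getElem?_eq_getElem hjlen
          rw [hm1] at h2
          exact (Option.some_inj.mp h2).symm
        rw [List.getElem_map, List.getElem_map, PySem.List.getElem_enumerate]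
        rw [List.getElem_map]; rw [hm1']
        have h5 : f = 'd' ∨ f = 's' ∨ f = 't' ∨ f = 'i' ∨ f = 'h' := by simpa using hf
        have hf1 : f ≠ '1' := by rcases h5 with rfl|rfl|rfl|rfl|rfl <;> decide
        rw [hw]
        unfold pvTm
        simp only [if_neg hf1, if_pos hf, hlk]
        have harg : ((List.count f s : Int) - 1 - (0 + (j:Int))).toNat
            = ((List.count f s : Int) - (((s.take ((m:Int).toNat)).count f : Nat) : Int) - 1).toNat := by
          rw [Int.toNat_natCast, hm3]
          omega
        rw [harg]

-- field_widths lookup: getD through a chain of conditional inserts at other keys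
lemma pv_condInsert_ne (b : Prop) [Decidable b] (d : PySem.Dict Char Int) (k c : Char) (v : Int)
    (h : c ≠ k) : ((if b then d.insert k v else d)).getD c 0 = d.getD c 0 := by
  split_ifs with hb
  · rw [PySem.Dict.getD_insert, if_neg h]
  · rfl

lemma pv_fw_spec (s : List Char) : ∀ c ∈ s, c ∈ "dstih".toList →
    ("dstih".toList.foldl (fun d c => if s.contains c then d.insert c ((s.count c : Int)) else d)
      PySem.Dict.empty).getD c 0 = (s.count c : Int) := by
  intro c hcs hcd
  have hct : s.contains c = true := by simpa using hcs
  have hl : "dstih".toList = ['d','s','t','i','h'] := by decide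
  rw [hl] at hcd ⊢
  simp only [List.foldl_cons, List.foldl_nil]
  rcases (by simpa using hcd : c = 'd' ∨ c = 's' ∨ c = 't' ∨ c = 'i' ∨ c = 'h') with
    rfl|rfl|rfl|rfl|rfl <;>
    (repeat rw [pv_condInsert_ne _ _ _ _ _ (by decide)]) <;>
    rw [if_pos hct, PySem.Dict.getD_insert_self]

lemma pv_pr0_spec (c : Char) :
    ("dstih".toList.foldl (fun d c => d.insert c 0) PySem.Dict.empty).getD c 0 = (0 : Int) := by
  have hl : "dstih".toList = ['d','s','t','i','h'] := by decide
  rw [hl]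
  simp only [List.foldl_cons, List.foldl_nil]
  simp only [PySem.Dict.getD_insert, PySem.Dict.getD_empty]
  split_ifs <;> rfl

-- ===== VERDICT (by name: the statement is the Claim_ definition above) =====
theorem build_machine_code_py_spec : Claim_equal_build_machine_code_py := by
  unfold Claim_equal_build_machine_code_py
  intro encoding operands _ hpre
  obtain ⟨_, hpre2⟩ := hpre
  unfold Spec_build_machine_code_py
  set s := pvStrip encoding with hs
  have hgood : ∀ c ∈ s, c ∈ "01dstih".toList ∨ (operands.lookup (String.ofList [c])).isNone = true := by
    intro c hc
    have h := (List.all_eq_true.mp hpre2) c hc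
    simpa using h
  -- notation for the per-class segments
  have hnonneg : ∀ x ∈ (PySem.List.enumerate s).map (pvTm s operands), 0 ≤ x := by
    intro x hx
    obtain ⟨p, _, rfl⟩ := List.mem_map.mp hx
    exact pvTm_nonneg s operands p
  -- ==== A-side ====
  have hA : build_machine_code_py encoding operands
      = ((PySem.List.enumerate s).map (pvTm s operands)).foldl PySem.Int.bor 0 := by
    unfold build_machine_code_py
    rw [← hs]
    have h := pvA_loop operands s
      ("dstih".toList.foldl (fun d c => if s.contains c then d.insert c ((s.count c : Int)) else d)
        PySem.Dict.empty) hgood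
      (fun c hcs hcd => pv_fw_spec s c hcs hcd)
      s 0 (by rw [List.drop_zero]) 0
      ("dstih".toList.foldl (fun d c => d.insert c 0) PySem.Dict.empty)
      (fun c _ _ => by rw [pv_pr0_spec c]; simp)
    simpa using h
  -- ==== partition both sides by the character classes ====
  have hperm := pv_perm_partition ('1' :: "dstih".toList) (PySem.List.enumerate s) (by decide)
  have hsplit : ((PySem.List.enumerate s).map (pvTm s operands)).foldl PySem.Int.bor 0
      = ((('1' :: "dstih".toList).flatMap
            (fun c => (PySem.List.enumerate s).filter (fun p => p.2 == c))).map
          (pvTm s operands)).foldl PySem.Int.bor 0 := by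
    rw [pv_foldl_bor_perm (hperm.map (pvTm s operands)) hnonneg 0 le_rfl]
    rw [List.map_append, List.foldl_append]
    rw [pv_foldl_bor_zeros]
    intro x hx
    obtain ⟨p, hp, rfl⟩ := List.mem_map.mp hx
    have hpf := List.of_mem_filter hp
    have h1 : p.2 ≠ '1' ∧ p.2 ∉ "dstih".toList := by
      constructor <;> intro h <;> simp at h hpf <;> tauto
    unfold pvTm
    rw [if_neg h1.1, if_neg h1.2]
  -- ==== expand the classes on the A side ====
  have hl6 : ('1' :: "dstih".toList) = ['1','d','s','t','i','h'] := by decide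
  rw [hA, hsplit, hl6]
  simp only [List.flatMap_cons, List.flatMap_nil, List.append_nil, List.map_append,
    List.foldl_append]
  -- ==== B side ====
  have hBdef : build_machine_code_py_alt encoding operands
      = "dstih".toList.foldl (pvBField s operands)
          ((PySem.List.enumerate s).foldl
            (fun machine_code p =>
              if p.2 == '1' then PySem.Int.bor machine_code (1 <<< (31 - p.1).toNat)
              else machine_code) 0) := by
    rw [hs]; rfl
  rw [hBdef]
  have hl5 : "dstih".toList = ['d','s','t','i','h'] := by decide
  rw [hl5]
  simp only [List.foldl_cons, List.foldl_nil]
  rw [pvBField_eq s operands 'd' (by decide), pvBField_eq s operands 's' (by decide),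
      pvBField_eq s operands 't' (by decide), pvBField_eq s operands 'i' (by decide),
      pvBField_eq s operands 'h' (by decide)]
  -- the fixed-ones pass equals the '1'-class segment
  have hones : ((PySem.List.enumerate s).foldl
        (fun machine_code p =>
          if p.2 == '1' then PySem.Int.bor machine_code (1 <<< (31 - p.1).toNat)
          else machine_code) 0)
      = (((PySem.List.enumerate s).filter (fun p => p.2 == '1')).map (pvTm s operands)).foldl
          PySem.Int.bor 0 := by
    rw [pv_ones_shape]
    have hperm1 := pv_perm_partition ['1'] (PySem.List.enumerate s) (by decide)
    have hn1 : ∀ x ∈ (PySem.List.enumerate s).map (fun p => if p.2 == '1' then pvTwo p.1 else 0),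
        0 ≤ x := by
      intro x hx
      obtain ⟨p, _, rfl⟩ := List.mem_map.mp hx
      split_ifs
      · exact pvTwo_nonneg _
      · exact le_rfl
    rw [pv_foldl_bor_perm (hperm1.map _) hn1 0 le_rfl]
    simp only [List.flatMap_cons, List.flatMap_nil, List.append_nil, List.map_append,
      List.foldl_append]
    rw [pv_foldl_bor_zeros ((((PySem.List.enumerate s).filter
          (fun p => !(['1'].contains p.2))).map (fun p => if p.2 == '1' then pvTwo p.1 else 0))) ?_]
    · congr 1
      apply List.map_congr_left
      intro p hp
      have hpf : p.2 = '1' := by simpa using List.of_mem_filter hp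
      unfold pvTm
      rw [if_pos (by simpa using hpf), if_pos hpf]
    · intro x hx
      obtain ⟨p, hp, rfl⟩ := List.mem_map.mp hx
      have hpf : ¬(p.2 = '1') := by simpa using List.of_mem_filter hp
      rw [if_neg (by simpa using hpf)]
  rw [hones]
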